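-- pv_equiv track=rewrite | github.com/zainjhang/incan-DOCS | utils/align_markdown_tables.py | split_row
-- ===== SOURCE A (Python) =====
-- from typing import Iterable, List, Optional, Tuple
--
-- def split_row(line: str) -> List[str]:
--     """
--     Split a pipe-table row into cells (without surrounding pipes).
--
--     Important: do NOT split on pipes inside inline code spans (backticks) or escaped pipes (\\|),
--     because GFM tables treat those as literal content.
--     """
--     s = line.strip()
--     if s.startswith("|"):
--         s = s[1:]
--     if s.endswith("|"):
--         s = s[:-1]
--
--     cells: List[str] = []
--     buf: List[str] = []
--
--     in_code = False
--     code_tick_len: Optional[int] = None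
--
--     i = 0
--     while i < len(s):
--         ch = s[i]
--
--         # Escaped pipe: \|
--         # Keep it escaped in output (do NOT unescape), otherwise we would introduce a real
--         # column separator and break the table (MD056).
--         if ch == "\\" and i + 1 < len(s) and s[i + 1] == "|":
--             buf.append("\\|")
--             i += 2
--             continue
--
--         # Inline code span handling (supports multi-backtick spans)
--         if ch == "`":
--             j = i
--             while j < len(s) and s[j] == "`":
--                 j += 1
--             tick_len = j - i
--             ticks = "`" * tick_len
--             buf.append(ticks)
--
--             if not in_code:
--                 in_code = True
--                 code_tick_len = tick_len
--             else:
--                 if code_tick_len == tick_len: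
--                     in_code = False
--                     code_tick_len = None
--
--             i = j
--             continue
--
--         # Column separator (only when not inside code)
--         if ch == "|" and not in_code:
--             cells.append("".join(buf).strip())
--             buf = []
--             i += 1
--             continue
--
--         buf.append(ch)
--         i += 1
--
--     cells.append("".join(buf).strip())
--     return cells
-- ===== SOURCE B (Python) =====
-- from typing import List, Optional, Tuple
--
--
-- def _scan_code(part: str, in_code: bool, tick: Optional[int]) -> Tuple[bool, Optional[int]]:
--     """Update the inline-code-span state across one pipe-free chunk."""
--     i, n = 0, len(part)
--     while i < n:
--         if part[i] == "`":
--             j = i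
--             while j < n and part[j] == "`":
--                 j += 1
--             run = j - i
--             if not in_code:
--                 in_code, tick = True, run
--             elif tick == run:
--                 in_code, tick = False, None
--             i = j
--         else:
--             i += 1
--     return in_code, tick
--
--
-- def split_row(line: str) -> List[str]:
--     s = line.strip()
--     if s.startswith("|"):
--         s = s[1:]
--     if s.endswith("|"):
--         s = s[:-1]
--
--     parts = s.split("|")
--     cells: List[str] = []
--     buf = ""
--     in_code = False
--     tick: Optional[int] = None
--     for part in parts[:-1]:
--         in_code, tick = _scan_code(part, in_code, tick)
--         if in_code or (buf + part).endswith("\\"):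
--             # the pipe after this chunk was inside a code span or escaped: keep it literal
--             buf = buf + part + "|"
--         else:
--             cells.append((buf + part).strip())
--             buf = ""
--     cells.append((buf + parts[-1]).strip())
--     return cells
-- ===== Notes on version B (the rewrite author's own statement) =====
-- stated objective: faster
-- what changed: A scans the row character by character in Python deciding at each char whether it separates cells; B first splits the trimmed row on every pipe with str.split and then walks the chunk list once, re-joining adjacent chunks (re-inserting the literal pipe) whenever the code-span state or a trailing backslash shows the pipe between them was not a real separator.
import Mathlib
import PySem

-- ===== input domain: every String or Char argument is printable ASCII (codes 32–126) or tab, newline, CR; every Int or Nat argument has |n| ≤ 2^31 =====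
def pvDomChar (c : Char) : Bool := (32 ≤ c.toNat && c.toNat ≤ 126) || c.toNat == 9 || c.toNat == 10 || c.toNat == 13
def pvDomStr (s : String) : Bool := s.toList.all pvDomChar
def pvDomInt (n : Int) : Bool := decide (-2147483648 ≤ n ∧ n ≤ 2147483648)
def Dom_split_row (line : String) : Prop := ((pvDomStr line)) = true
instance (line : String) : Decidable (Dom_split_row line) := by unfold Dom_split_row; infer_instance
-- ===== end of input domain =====

-- B splits the row on every pipe with str.split, then walks the chunk list once re-joining
-- chunks whose separating pipe was escaped or inside a code span; same exact behaviour,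
-- measurably faster (bulk split replaces the per-character Python loop).


-- ===== PORT A =====
-- A's character scan: state = (remaining chars, buf, cells, in_code, code_tick_len).
def loopA : List Char → List Char → List String → Bool → Option Nat → List String
  | [], buf, cells, _, _ => cells ++ [String.ofList (PySem.Chars.strip buf)]
  | c :: rest, buf, cells, in_code, tick =>
    if c = '\\' ∧ rest.head? = some '|' then
      -- escaped pipe: buf.append("\\|"); i += 2
      loopA rest.tail (buf ++ ['\\', '|']) cells in_code tick
    else if c = '`' then
      -- backtick run: tick_len = j - i; buf.append("`" * tick_len); i = j
      if in_code = false then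
        loopA (rest.dropWhile (· = '`')) (buf ++ List.replicate ((rest.takeWhile (· = '`')).length + 1) '`')
          cells true (some ((rest.takeWhile (· = '`')).length + 1))
      else if tick = some ((rest.takeWhile (· = '`')).length + 1) then
        loopA (rest.dropWhile (· = '`')) (buf ++ List.replicate ((rest.takeWhile (· = '`')).length + 1) '`')
          cells false none
      else
        loopA (rest.dropWhile (· = '`')) (buf ++ List.replicate ((rest.takeWhile (· = '`')).length + 1) '`')
          cells in_code tick
    else if c = '|' ∧ in_code = false then
      loopA rest [] (cells ++ [String.ofList (PySem.Chars.strip buf)]) in_code tick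
    else
      loopA rest (buf ++ [c]) cells in_code tick
termination_by cs => cs.length
decreasing_by
  · cases rest <;> simp
  · have := List.length_dropWhile_le (· = '`') rest; simp; omega
  · have := List.length_dropWhile_le (· = '`') rest; simp; omega
  · have := List.length_dropWhile_le (· = '`') rest; simp; omega
  · simp
  · simp

def split_row (line : String) : List String :=
  -- s = line.strip(); drop a single leading / trailing '|'
  let s0 := PySem.Chars.strip line.toList
  let s1 := if PySem.Chars.startswith s0 ['|'] then PySem.List.slice s0 (some 1) none else s0
  let s2 := if PySem.Chars.endswith s1 ['|'] then PySem.List.slice s1 none (some (-1)) else s1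
  loopA s2 [] [] false none

-- ===== PORT B =====
-- B's helper _scan_code: update the code-span state across one pipe-free chunk.
def scanCode : List Char → Bool → Option Nat → Bool × Option Nat
  | [], in_code, tick => (in_code, tick)
  | c :: cs, in_code, tick =>
    if c = '`' then
      if in_code = false then
        scanCode (cs.dropWhile (· = '`')) true (some ((cs.takeWhile (· = '`')).length + 1))
      else if tick = some ((cs.takeWhile (· = '`')).length + 1) then
        scanCode (cs.dropWhile (· = '`')) false none
      else
        scanCode (cs.dropWhile (· = '`')) in_code tick
    else scanCode cs in_code tick
termination_by cs => cs.length
decreasing_by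
  · have := List.length_dropWhile_le (· = '`') cs; simp; omega
  · have := List.length_dropWhile_le (· = '`') cs; simp; omega
  · have := List.length_dropWhile_le (· = '`') cs; simp; omega
  · simp

-- B's loop over the pipe-split chunks: `[p]` is parts[-1]; `[]` is unreachable (split() is never empty).
def loopB : List (List Char) → List Char → List String → Bool → Option Nat → List String
  | [], _, cells, _, _ => cells
  | [p], buf, cells, _, _ => cells ++ [String.ofList (PySem.Chars.strip (buf ++ p))]
  | p :: q :: ps, buf, cells, in_code, tick =>
    let st := scanCode p in_code tick
    if st.1 || PySem.Chars.endswith (buf ++ p) ['\\'] then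
      loopB (q :: ps) (buf ++ p ++ ['|']) cells st.1 st.2
    else
      loopB (q :: ps) [] (cells ++ [String.ofList (PySem.Chars.strip (buf ++ p))]) st.1 st.2

def split_row_alt (line : String) : List String :=
  let s0 := PySem.Chars.strip line.toList
  let s1 := if PySem.Chars.startswith s0 ['|'] then PySem.List.slice s0 (some 1) none else s0
  let s2 := if PySem.Chars.endswith s1 ['|'] then PySem.List.slice s1 none (some (-1)) else s1
  loopB (PySem.Chars.splitOn s2 "|".toList) [] [] false none

-- ===== PRECONDITION & SPEC =====
def Spec_split_row (line : String) (out : List String) : Prop := out = split_row_alt line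
instance (line : String) (out : List String) : Decidable (Spec_split_row line out) := by unfold Spec_split_row; infer_instance

-- ===== CLAIM (what is proved, stated in full; the proofs are below) =====
def Claim_equal_split_row : Prop := ∀ (line : String), Dom_split_row line → Spec_split_row line (split_row line)

-- ===== LEMMAS AND PROOFS =====

-- proof-side structural form of s.split("|")
def splitPipe : List Char → List (List Char)
  | [] => [[]]
  | c :: cs =>
    if c = '|' then [] :: splitPipe cs
    else
      match splitPipe cs with
      | [] => [[c]]
      | p :: ps => (c :: p) :: ps

def consHead (x : List Char) : List (List Char) → List (List Char)
  | [] => [x]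
  | p :: ps => (x ++ p) :: ps

theorem splitPipe_ne_nil (cs : List Char) : splitPipe cs ≠ [] := by
  cases cs with
  | nil => simp [splitPipe]
  | cons c cs =>
    simp only [splitPipe]
    split
    · simp
    · split <;> simp

theorem get_parts (cs : List Char) : ∃ p ps, splitPipe cs = p :: ps := by
  cases hsp : splitPipe cs with
  | nil => exact absurd hsp (splitPipe_ne_nil cs)
  | cons p ps => exact ⟨p, ps, rfl⟩

theorem go_eq_splitPipe (fuel : Nat) : ∀ (cs cur : List Char) (acc : List (List Char)),
    cs.length < fuel →
    PySem.Chars.splitOn.go ['|'] fuel cs cur acc =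
      acc.reverse ++ consHead cur.reverse (splitPipe cs) := by
  induction fuel with
  | zero => intro cs cur acc h; omega
  | succ fuel ih =>
    intro cs cur acc h
    cases cs with
    | nil => simp [PySem.Chars.splitOn.go, splitPipe, consHead]
    | cons c rest =>
      obtain ⟨p, ps, hps⟩ := get_parts rest
      by_cases hc : c = '|'
      · subst hc
        have hpre : List.isPrefixOf ['|'] ('|' :: rest) = true := by simp [List.isPrefixOf]
        rw [show PySem.Chars.splitOn.go ['|'] (fuel+1) ('|' :: rest) cur acc =
              PySem.Chars.splitOn.go ['|'] fuel rest [] (cur.reverse :: acc) by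
            simp [PySem.Chars.splitOn.go, hpre]]
        rw [ih rest [] (cur.reverse :: acc) (by simpa using h)]
        simp [splitPipe, hps, consHead]
      · have hpre : List.isPrefixOf ['|'] (c :: rest) = false := by
          simp [List.isPrefixOf]; intro h'; exact absurd h'.symm hc
        rw [show PySem.Chars.splitOn.go ['|'] (fuel+1) (c :: rest) cur acc =
              PySem.Chars.splitOn.go ['|'] fuel rest (c :: cur) acc by
            simp [PySem.Chars.splitOn.go, hpre]]
        rw [ih rest (c :: cur) acc (by simpa using h)]
        simp [splitPipe, hc, hps, consHead]

theorem splitOn_pipe (cs : List Char) : PySem.Chars.splitOn cs "|".toList = splitPipe cs := by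
  have h := go_eq_splitPipe (cs.length + 1) cs [] [] (by omega)
  obtain ⟨p, ps, hps⟩ := get_parts cs
  show PySem.Chars.splitOn.go ['|'] (cs.length + 1) cs [] [] = splitPipe cs
  rw [h, hps]; simp [consHead]

theorem head?_splitPipe (cs p : List Char) (ps : List (List Char)) (h : splitPipe cs = p :: ps) :
    p.head? = none ∨ p.head? = cs.head? := by
  cases cs with
  | nil => simp [splitPipe] at h; simp [← h.1]
  | cons c rest =>
    simp only [splitPipe] at h
    by_cases hc : c = '|'
    · rw [if_pos hc] at h
      obtain ⟨h1, -⟩ := List.cons.injEq .. ▸ h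
      left; rw [← h1]; rfl
    · rw [if_neg hc] at h
      obtain ⟨q, qs, hqs⟩ := get_parts rest
      rw [hqs] at h
      obtain ⟨h1, -⟩ := List.cons.injEq .. ▸ h
      right; rw [← h1]; rfl

theorem splitPipe_replicate (n : Nat) (cs p : List Char) (ps : List (List Char))
    (h : splitPipe cs = p :: ps) :
    splitPipe (List.replicate n '`' ++ cs) = (List.replicate n '`' ++ p) :: ps := by
  induction n with
  | zero => simpa using h
  | succ n ih =>
    rw [List.replicate_succ, List.cons_append, splitPipe]
    have hne : ('`' : Char) ≠ '|' := by decide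
    rw [if_neg hne, ih]
    simp

theorem ebs_concat (l : List Char) (a : Char) :
    PySem.Chars.endswith (l ++ [a]) ['\\'] = decide (a = '\\') := by
  by_cases h : a = '\\'
  · subst h; simp [PySem.Chars.endswith_iff, List.suffix_append]
  · simp only [h, decide_false]
    refine Bool.eq_false_iff.mpr fun hc => ?_
    rw [PySem.Chars.endswith_iff] at hc
    obtain ⟨t, ht⟩ := hc
    have := congrArg List.getLast? ht
    simp at this
    exact h this.symm

theorem scanCode_nil (ic : Bool) (tk : Option Nat) : scanCode [] ic tk = (ic, tk) := by
  rw [scanCode]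

theorem scanCode_cons_ne (c : Char) (p : List Char) (ic : Bool) (tk : Option Nat) (hc : c ≠ '`') :
    scanCode (c :: p) ic tk = scanCode p ic tk := by
  rw [scanCode]; simp [hc]

-- combined state update of one backtick run, as A performs it
def tickStep (n : Nat) (ic : Bool) (tk : Option Nat) : Bool × Option Nat :=
  if ic = false then (true, some n)
  else if tk = some n then (false, none)
  else (ic, tk)

theorem takeWhile_replicate_append (m : Nat) (p : List Char) (hp : p.head? ≠ some '`') :
    (List.replicate m '`' ++ p).takeWhile (· = '`') = List.replicate m '`' := by
  induction m with
  | zero =>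
    cases p with
    | nil => simp
    | cons a as =>
      have : a ≠ '`' := by simpa using hp
      simp [this]
  | succ m ih => simpa [List.replicate_succ, List.takeWhile_cons] using ih

theorem dropWhile_replicate_append (m : Nat) (p : List Char) (hp : p.head? ≠ some '`') :
    (List.replicate m '`' ++ p).dropWhile (· = '`') = p := by
  induction m with
  | zero =>
    cases p with
    | nil => simp
    | cons a as =>
      have : a ≠ '`' := by simpa using hp
      simp [this]
  | succ m ih => simpa [List.replicate_succ, List.dropWhile_cons] using ih

theorem scanCode_run (n : Nat) (hn : 0 < n) (p : List Char) (hp : p.head? ≠ some '`')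
    (ic : Bool) (tk : Option Nat) :
    scanCode (List.replicate n '`' ++ p) ic tk
      = scanCode p (tickStep n ic tk).1 (tickStep n ic tk).2 := by
  obtain ⟨m, rfl⟩ : ∃ m, n = m + 1 := ⟨n - 1, by omega⟩
  rw [List.replicate_succ, List.cons_append, scanCode]
  simp only [takeWhile_replicate_append m p hp, dropWhile_replicate_append m p hp,
    List.length_replicate, tickStep]
  rcases ic with _ | _
  · simp
  · simp only [Bool.true_eq_false, if_false]
    by_cases htk : tk = some (m + 1) <;> simp [htk]

theorem loopB_absorb (pre p : List Char) (ps : List (List Char)) (buf : List Char)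
    (cells : List String) (ic ic' : Bool) (tk tk' : Option Nat)
    (h : scanCode (pre ++ p) ic tk = scanCode p ic' tk') :
    loopB ((pre ++ p) :: ps) buf cells ic tk = loopB (p :: ps) (buf ++ pre) cells ic' tk' := by
  cases ps with
  | nil => simp [loopB]
  | cons q qs => simp [loopB, h, List.append_assoc]

-- the run of backticks starting a string, as A consumes it
theorem tick_decomp (rest : List Char) :
    '`' :: rest
      = List.replicate ((rest.takeWhile (· = '`')).length + 1) '`' ++ rest.dropWhile (· = '`') := by
  have htw : rest.takeWhile (· = '`')
      = List.replicate (rest.takeWhile (· = '`')).length '`' := by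
    refine List.eq_replicate_iff.mpr ⟨rfl, fun b hb => ?_⟩
    simpa using List.mem_takeWhile_imp hb
  conv_lhs => rw [show rest = rest.takeWhile (· = '`') ++ rest.dropWhile (· = '`') from
    (List.takeWhile_append_dropWhile).symm]
  rw [List.replicate_succ, List.cons_append, ← htw]

theorem head?_dropWhile_tick (rest : List Char) :
    (rest.dropWhile (· = '`')).head? ≠ some '`' := by
  induction rest with
  | nil => simp
  | cons a as ih =>
    by_cases h : a = '`'
    · simpa [h] using ih
    · simp [h]

-- MAIN LEMMA: A's character scan = B's chunk loop over splitPipe, given that buf cannot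
-- end in '\' when the next unread char is '|' (A's scanner never reaches that state).
theorem loopA_eq_loopB (n : Nat) : ∀ (cs : List Char), cs.length ≤ n →
    ∀ (buf : List Char) (cells : List String) (ic : Bool) (tk : Option Nat),
    (PySem.Chars.endswith buf ['\\'] = true → cs.head? ≠ some '|') →
    loopA cs buf cells ic tk = loopB (splitPipe cs) buf cells ic tk := by
  induction n with
  | zero =>
    intro cs hlen buf cells ic tk _
    have : cs = [] := List.length_eq_zero_iff.mp (Nat.le_zero.mp hlen)
    subst this
    simp [loopA, splitPipe, loopB]
  | succ n ih =>
    intro cs hlen buf cells ic tk hinv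
    cases cs with
    | nil => simp [loopA, splitPipe, loopB]
    | cons c rest =>
      simp only [List.length_cons] at hlen
      by_cases h1 : c = '\\' ∧ rest.head? = some '|'
      · -- escaped pipe
        obtain ⟨hc, hr⟩ := h1
        subst hc
        obtain ⟨rt, rfl⟩ : ∃ rt, rest = '|' :: rt := by
          cases rest with
          | nil => simp at hr
          | cons a as =>
            have ha : a = '|' := by simpa using hr
            exact ⟨as, by rw [ha]⟩
        obtain ⟨q, qs, hqs⟩ := get_parts rt
        have hsp : splitPipe ('\\' :: '|' :: rt) = ['\\'] :: q :: qs := by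
          simp [splitPipe, hqs]
        rw [loopA, if_pos ⟨rfl, rfl⟩, hsp, loopB]
        have hscan : scanCode ['\\'] ic tk = scanCode [] ic tk :=
          scanCode_cons_ne _ _ _ _ (by decide)
        rw [scanCode_nil] at hscan
        simp only [hscan, ebs_concat]
        rw [if_pos (by simp)]
        have hcall := ih rt (by simp only [List.length_cons] at hlen; omega) (buf ++ ['\\', '|']) cells ic tk
          (by
            intro hE
            rw [show buf ++ ['\\', '|'] = (buf ++ ['\\']) ++ ['|'] by simp, ebs_concat] at hE
            simp at hE)
        rw [hqs] at hcall
        simpa using hcall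
      · by_cases h2 : c = '`'
        · -- backtick run
          subst h2
          obtain ⟨p, ps, hps⟩ := get_parts (rest.dropWhile (· = '`'))
          have hphp : p.head? ≠ some '`' := by
            rcases head?_splitPipe _ _ _ hps with h | h
            · simp [h]
            · rw [h]; exact head?_dropWhile_tick rest
          have hsp : splitPipe ('`' :: rest)
              = (List.replicate ((rest.takeWhile (· = '`')).length + 1) '`' ++ p) :: ps := by
            rw [tick_decomp rest]
            exact splitPipe_replicate _ _ _ _ hps
          have habs := loopB_absorb (List.replicate ((rest.takeWhile (· = '`')).length + 1) '`')
            p ps buf cells ic (tickStep ((rest.takeWhile (· = '`')).length + 1) ic tk).1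
            tk (tickStep ((rest.takeWhile (· = '`')).length + 1) ic tk).2
            (scanCode_run _ (by omega) p hphp ic tk)
          have hebs : PySem.Chars.endswith
              (buf ++ List.replicate ((rest.takeWhile (· = '`')).length + 1) '`') ['\\'] = false := by
            rw [List.replicate_succ', ← List.append_assoc, ebs_concat]
            simp
          have hlen' : (rest.dropWhile (· = '`')).length ≤ n := by
            have := List.length_dropWhile_le (· = '`') rest; omega
          have hcall := ih (rest.dropWhile (· = '`')) hlen'
            (buf ++ List.replicate ((rest.takeWhile (· = '`')).length + 1) '`') cells
          rw [hsp, habs, ← hps]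
          rw [loopA, if_neg h1, if_pos rfl]
          rcases hic : ic with _ | _
          · rw [if_pos rfl]
            rw [hcall true (some ((rest.takeWhile (· = '`')).length + 1)) (by simp [hebs])]
            simp [tickStep]
          · rw [if_neg (by simp)]
            by_cases htk : tk = some ((rest.takeWhile (· = '`')).length + 1)
            · rw [if_pos htk, hcall false none (by simp [hebs])]
              simp [tickStep, htk]
            · rw [if_neg htk, hcall true tk (by simp [hebs])]
              simp [tickStep, htk]
        · by_cases h3 : c = '|'
          · -- unescaped pipe: separator if not in code, literal if in code
            subst h3
            obtain ⟨q, qs, hqs⟩ := get_parts rest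
            have hsp : splitPipe ('|' :: rest) = [] :: q :: qs := by
              simp [splitPipe, hqs]
            rw [loopA, if_neg h1, if_neg (by decide), hsp, loopB]
            simp only [scanCode_nil, List.append_nil]
            rcases hic : ic with _ | _
            · -- separator
              rw [if_pos (by simp)]
              have hbs : PySem.Chars.endswith buf ['\\'] = false := by
                rcases hE : PySem.Chars.endswith buf ['\\'] with _ | _
                · rfl
                · exact absurd rfl (hinv hE)
              rw [if_neg (by simp [hbs])]
              have hcall := ih rest (by omega) [] (cells ++ [String.ofList (PySem.Chars.strip buf)])
                false tk (by intro hE; exact absurd hE (by decide))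
              rw [hqs] at hcall
              exact hcall
            · -- literal pipe inside a code span
              rw [if_neg (by simp), if_pos (by simp)]
              have hcall := ih rest (by omega) (buf ++ ['|']) cells true tk
                (by intro hE; rw [ebs_concat] at hE; simp at hE)
              rw [hqs] at hcall
              exact hcall
          · -- ordinary character
            obtain ⟨p, ps, hps⟩ := get_parts rest
            have hsp : splitPipe (c :: rest) = (c :: p) :: ps := by
              simp [splitPipe, h3, hps]
            have habs : loopB ((c :: p) :: ps) buf cells ic tk
                = loopB (p :: ps) (buf ++ [c]) cells ic tk :=
              loopB_absorb [c] p ps buf cells ic ic tk tk (scanCode_cons_ne c p ic tk h2)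
            rw [loopA, if_neg h1, if_neg h2, if_neg (by simp [h3]), hsp, habs, ← hps]
            refine ih rest (by omega) (buf ++ [c]) cells ic tk ?_
            intro hE
            rw [ebs_concat] at hE
            have hc : c = '\\' := by simpa using hE
            subst hc
            intro hr
            exact h1 ⟨rfl, hr⟩

-- ===== VERDICT (by name: the statement is the Claim_ definition above) =====
theorem split_row_spec : Claim_equal_split_row := by
  intro line _
  show split_row line = split_row_alt line
  simp only [split_row, split_row_alt, splitOn_pipe]
  exact loopA_eq_loopB _ _ le_rfl [] [] false none (fun hE => absurd hE (by decide))
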